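-- pv_equiv track=rewrite | github.com/Myeongjung/HackerRank | Problem Solving/Solution #116-130.py | queensAttack
-- ===== SOURCE A (Python) =====
-- def queensAttack(n, k, r_q, c_q, obstacles):
--     obstacles = {(ob[0],ob[1]) for ob in obstacles}
--
--     mvs, count = [(1,0),(0,1),(-1,0),(0,-1),(1,1),(-1,-1),(-1,1),(1,-1)], 0
--
--     for m in mvs:
--         cr, cc = r_q, c_q
--         while (cr + m[0] >= 1 and cr + m[0] <= n) and (cc + m[1] >= 1 and cc + m[1] <= n):
--             cr += m[0]
--             cc += m[1]
--             if (cr, cc) in obstacles:break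
--             count += 1
--
--     return count
-- ===== SOURCE B (Python) =====
-- def queensAttack(n, k, r_q, c_q, obstacles):
--     def sign(x):
--         return (x > 0) - (x < 0)
--
--     def edge(d, x):
--         # distance from x to the board edge in direction d
--         return n - x if d > 0 else x - 1
--
--     def reach(dr, dc):
--         # free squares along the ray (dr, dc) up to the board edge
--         if not (1 <= r_q + dr <= n and 1 <= c_q + dc <= n):
--             return 0
--         if dr == 0:
--             return edge(dc, c_q)
--         if dc == 0:
--             return edge(dr, r_q)
--         return min(edge(dr, r_q), edge(dc, c_q))
--
--     dirs = [(1, 0), (0, 1), (-1, 0), (0, -1), (1, 1), (-1, -1), (-1, 1), (1, -1)]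
--     lim = {d: reach(*d) for d in dirs}
--
--     for ob in obstacles:
--         u, v = ob[0] - r_q, ob[1] - c_q
--         if (u or v) and (u == 0 or v == 0 or abs(u) == abs(v)):
--             d = (sign(u), sign(v))
--             t = max(abs(u), abs(v))
--             lim[d] = min(lim[d], t - 1)
--
--     return sum(lim.values())
-- ===== Notes on version B (the rewrite author's own statement) =====
-- stated objective: alternative
-- what changed: Instead of walking every ray square by square over a hash set of obstacles, B computes each ray's reach in closed form from the queen's distances to the board edges and lowers it in one classifying scan of the obstacle list, removing the dependence of the work on the board size n; Pre_ only excludes obstacle entries of length < 2, on which both A and B raise IndexError.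
import Mathlib
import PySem

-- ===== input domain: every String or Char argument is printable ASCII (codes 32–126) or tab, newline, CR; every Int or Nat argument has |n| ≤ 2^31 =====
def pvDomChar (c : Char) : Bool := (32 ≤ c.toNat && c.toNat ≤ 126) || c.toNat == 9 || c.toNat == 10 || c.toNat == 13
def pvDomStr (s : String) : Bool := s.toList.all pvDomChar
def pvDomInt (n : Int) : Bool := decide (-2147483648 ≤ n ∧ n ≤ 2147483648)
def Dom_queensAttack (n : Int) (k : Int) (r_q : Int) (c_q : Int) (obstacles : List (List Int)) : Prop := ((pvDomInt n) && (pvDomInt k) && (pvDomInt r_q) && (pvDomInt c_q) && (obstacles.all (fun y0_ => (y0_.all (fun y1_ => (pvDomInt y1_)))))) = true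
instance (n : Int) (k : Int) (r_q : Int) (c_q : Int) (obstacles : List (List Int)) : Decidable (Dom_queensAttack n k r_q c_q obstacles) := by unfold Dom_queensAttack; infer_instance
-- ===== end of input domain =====

-- B replaces A's square-by-square walk along each ray by closed-form edge distances
-- lowered in a single classifying scan of the obstacle list, so the work no longer
-- depends on the board size n; objective: an alternative algorithm.


-- ===== PORT A =====
-- A's obstacle set {(ob[0], ob[1]) for ob in obstacles}; ob[0]/ob[1] raise on lists of
-- length < 2 (excluded by Pre_), so the .getD 0 default is never used inside Pre_.
def pvObsSet (obstacles : List (List Int)) : PySem.Set (Int × Int) :=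
  PySem.Set.ofList (obstacles.map (fun ob =>
    ((PySem.List.pyGet? ob 0).getD 0, (PySem.List.pyGet? ob 1).getD 0)))

-- A's inner while loop; the fuel n.toNat + 1 is an upper bound on its iterations
-- (each executed step keeps the moving coordinate inside [1, n]), so it never runs out.
def pvWhileA (n dr dc : Int) (obs : PySem.Set (Int × Int)) :
    Nat → Int → Int → Int → Int
  | 0, _, _, count => count
  | fuel + 1, cr, cc, count =>
    if (1 ≤ cr + dr ∧ cr + dr ≤ n) ∧ (1 ≤ cc + dc ∧ cc + dc ≤ n) then
      if PySem.Set.contains obs (cr + dr, cc + dc) then count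
      else pvWhileA n dr dc obs fuel (cr + dr) (cc + dc) (count + 1)
    else count

def queensAttack (n : Int) (k : Int) (r_q : Int) (c_q : Int) (obstacles : List (List Int)) : Int :=
  let obs := pvObsSet obstacles
  let mvs : List (Int × Int) := [(1,0),(0,1),(-1,0),(0,-1),(1,1),(-1,-1),(-1,1),(1,-1)]
  mvs.foldl (fun count m => pvWhileA n m.1 m.2 obs (n.toNat + 1) r_q c_q count) 0

-- ===== PORT B =====
-- Source B's ob[0], ob[1] (inside Pre_ the .getD 0 default is never used)
def pvR (ob : List Int) : Int := (PySem.List.pyGet? ob 0).getD 0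
def pvC (ob : List Int) : Int := (PySem.List.pyGet? ob 1).getD 0

-- Source B's helper sign(x) = (x > 0) - (x < 0)
def pvSign (x : Int) : Int := (if 0 < x then 1 else 0) - (if x < 0 then 1 else 0)

-- Python's abs on an int
def pvAbs (x : Int) : Int := if x < 0 then -x else x

-- Source B's loop body: skip the queen's own square, classify an aligned obstacle onto
-- its ray and lower that ray's limit
def pvStepB (r_q c_q : Int) (lim : PySem.Dict (Int × Int) Int) (ob : List Int) :
    PySem.Dict (Int × Int) Int :=
  let u := pvR ob - r_q
  let v := pvC ob - c_q
  if u = 0 ∧ v = 0 then lim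
  else if u = 0 ∨ v = 0 ∨ pvAbs u = pvAbs v then
    let d : Int × Int := (pvSign u, pvSign v)
    let t := max (pvAbs u) (pvAbs v)
    PySem.Dict.insert lim d (min (PySem.Dict.getD lim d 0) (t - 1))
  else lim

-- Source B's helper edge(d, x): distance from x to the board edge in direction d
def pvEdge (n d x : Int) : Int := if 0 < d then n - x else x - 1

-- Source B's helper reach(dr, dc): free squares along the ray up to the board edge
def pvReach (n r_q c_q dr dc : Int) : Int :=
  if ¬ ((1 ≤ r_q + dr ∧ r_q + dr ≤ n) ∧ (1 ≤ c_q + dc ∧ c_q + dc ≤ n)) then 0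
  else if dr = 0 then pvEdge n dc c_q
  else if dc = 0 then pvEdge n dr r_q
  else min (pvEdge n dr r_q) (pvEdge n dc c_q)

def pvDirsB : List (Int × Int) := [(1,0),(0,1),(-1,0),(0,-1),(1,1),(-1,-1),(-1,1),(1,-1)]

def queensAttack_alt (n : Int) (k : Int) (r_q : Int) (c_q : Int) (obstacles : List (List Int)) : Int :=
  let lim0 := pvDirsB.foldl
    (fun m d => PySem.Dict.insert m d (pvReach n r_q c_q d.1 d.2)) PySem.Dict.empty
  let lim := obstacles.foldl (pvStepB r_q c_q) lim0
  (PySem.Dict.values lim).sum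

-- ===== PRECONDITION & SPEC =====
-- Pre_ excludes exactly the inputs on which A raises IndexError: an obstacle entry with
-- fewer than two coordinates (ob[0] / ob[1]); B raises there as well.
def Pre_queensAttack (n : Int) (k : Int) (r_q : Int) (c_q : Int) (obstacles : List (List Int)) : Prop :=
  ∀ ob ∈ obstacles, 2 ≤ ob.length
instance (n : Int) (k : Int) (r_q : Int) (c_q : Int) (obstacles : List (List Int)) : Decidable (Pre_queensAttack n k r_q c_q obstacles) := by unfold Pre_queensAttack; infer_instance

def pvWitness_queensAttack : Int × Int × Int × Int × List (List Int) :=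
  (4, 1, 2, 2, [[2, 3]])

def Spec_queensAttack (n : Int) (k : Int) (r_q : Int) (c_q : Int) (obstacles : List (List Int)) (out : Int) : Prop := out = queensAttack_alt n k r_q c_q obstacles
instance (n : Int) (k : Int) (r_q : Int) (c_q : Int) (obstacles : List (List Int)) (out : Int) : Decidable (Spec_queensAttack n k r_q c_q obstacles out) := by unfold Spec_queensAttack; infer_instance

-- ===== CLAIM (what is proved, stated in full; the proofs are below) =====
def Claim_equal_queensAttack : Prop := ∀ (n : Int) (k : Int) (r_q : Int) (c_q : Int) (obstacles : List (List Int)), Dom_queensAttack n k r_q c_q obstacles → Pre_queensAttack n k r_q c_q obstacles → Spec_queensAttack n k r_q c_q obstacles (queensAttack n k r_q c_q obstacles)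

-- ===== LEMMAS AND PROOFS =====

-- free steps along one axis of a ray (moving by d each step) before leaving [1, n];
-- characterises A's walk, used only in the proofs
def pvAxis (n d x : Int) : Int :=
  if d = 1 then (if x < 0 then 0 else max (n - x) 0)
  else if d = -1 then (if x > n + 1 then 0 else max (x - 1) 0)
  else if 1 ≤ x ∧ x ≤ n then max n 0 else 0

def pvDirs : List (Int × Int) := [(1,0),(0,1),(-1,0),(0,-1),(1,1),(-1,-1),(-1,1),(1,-1)]

-- proof-side per-ray view: the directional distance of one obstacle, the
-- per-direction update, and the per-direction closed form the dict fold computes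
def pvT (r_q c_q dr dc : Int) (ob : List Int) : Int :=
  if dr ≠ 0 then dr * (pvR ob - r_q) else dc * (pvC ob - c_q)

def pvStep (r_q c_q dr dc lim : Int) (ob : List Int) : Int :=
  if 1 ≤ pvT r_q c_q dr dc ob ∧
     pvR ob - r_q = pvT r_q c_q dr dc ob * dr ∧
     pvC ob - c_q = pvT r_q c_q dr dc ob * dc ∧
     pvT r_q c_q dr dc ob - 1 < lim
  then pvT r_q c_q dr dc ob - 1 else lim

def pvRay (n r_q c_q dr dc : Int) (obstacles : List (List Int)) : Int :=
  obstacles.foldl (pvStep r_q c_q dr dc) (min (pvAxis n dr r_q) (pvAxis n dc c_q))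

-- step i of the ray (dr, dc) lands on the board
def pvStepOK (n r_q c_q dr dc i : Int) : Prop :=
  (1 ≤ r_q + i * dr ∧ r_q + i * dr ≤ n) ∧ (1 ≤ c_q + i * dc ∧ c_q + i * dc ≤ n)

theorem pvAxis_nonneg (n d x : Int) : 0 ≤ pvAxis n d x := by
  unfold pvAxis
  split_ifs <;> omega

theorem pvAxis_le (n d x : Int) : pvAxis n d x ≤ max n 0 := by
  unfold pvAxis
  split_ifs <;> omega

theorem pvAxis_band (n d x : Int) (hd : d = 1 ∨ d = 0 ∨ d = -1) (i : Int)
    (h1 : 1 ≤ i) (h2 : i ≤ pvAxis n d x) : 1 ≤ x + i * d ∧ x + i * d ≤ n := by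
  rcases hd with h | h | h <;> subst h <;>
    simp only [pvAxis, mul_one, mul_zero, mul_neg_one, Int.max_def] at h2 ⊢ <;>
    norm_num at h2 <;> split_ifs at h2 <;> omega

-- the fold only ever lowers lim, never below 0
theorem pvFold_le (r_q c_q dr dc : Int) (l : List (List Int)) :
    ∀ init : Int, 0 ≤ init →
      0 ≤ l.foldl (pvStep r_q c_q dr dc) init ∧
      l.foldl (pvStep r_q c_q dr dc) init ≤ init := by
  induction l with
  | nil => intro init h; exact ⟨h, le_refl _⟩
  | cons ob l ih =>
    intro init h
    simp only [List.foldl_cons, pvStep]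
    split_ifs with hc
    · have := ih (pvT r_q c_q dr dc ob - 1) (by omega)
      exact ⟨this.1, le_trans this.2 (by omega)⟩
    · exact ih init h

-- an aligned obstacle at distance t caps the fold at t - 1
theorem pvFold_obst (r_q c_q dr dc : Int) (l : List (List Int)) (ob : List Int)
    (hmem : ob ∈ l) (t : Int)
    (ht : t = pvT r_q c_q dr dc ob)
    (h1 : 1 ≤ t) (h2 : pvR ob - r_q = t * dr) (h3 : pvC ob - c_q = t * dc) :
    ∀ init : Int, 0 ≤ init →
      l.foldl (pvStep r_q c_q dr dc) init ≤ t - 1 := by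
  induction l with
  | nil => cases hmem
  | cons b l ih =>
    intro init hinit
    simp only [List.foldl_cons]
    rcases List.mem_cons.1 hmem with h | h
    · subst h
      by_cases hlt : t - 1 < init
      · have hstep : pvStep r_q c_q dr dc init ob = t - 1 := by
          unfold pvStep; rw [← ht]; rw [if_pos ⟨h1, h2, h3, hlt⟩]
        rw [hstep]
        exact (pvFold_le r_q c_q dr dc l (t - 1) (by omega)).2
      · have hle : pvStep r_q c_q dr dc init ob ≤ t - 1 := by
          unfold pvStep; rw [← ht]; split_ifs <;> omega
        have h0 : 0 ≤ pvStep r_q c_q dr dc init ob := by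
          unfold pvStep; rw [← ht]; split_ifs <;> omega
        exact le_trans (pvFold_le r_q c_q dr dc l _ h0).2 hle
    · have h0 : 0 ≤ pvStep r_q c_q dr dc init b := by
        unfold pvStep; split_ifs with hc
        · omega
        · exact hinit
      exact ih h _ h0

-- the fold's value is either the initial (edge) limit or t - 1 for some obstacle on the ray
theorem pvFold_cases (r_q c_q dr dc : Int) (l : List (List Int)) :
    ∀ init : Int,
      l.foldl (pvStep r_q c_q dr dc) init = init ∨
      ∃ ob ∈ l,
        1 ≤ pvT r_q c_q dr dc ob ∧
        pvR ob - r_q = pvT r_q c_q dr dc ob * dr ∧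
        pvC ob - c_q = pvT r_q c_q dr dc ob * dc ∧
        l.foldl (pvStep r_q c_q dr dc) init = pvT r_q c_q dr dc ob - 1 := by
  induction l with
  | nil => intro init; left; rfl
  | cons ob l ih =>
    intro init
    simp only [List.foldl_cons]
    by_cases hc : 1 ≤ pvT r_q c_q dr dc ob ∧
        pvR ob - r_q = pvT r_q c_q dr dc ob * dr ∧
        pvC ob - c_q = pvT r_q c_q dr dc ob * dc ∧
        pvT r_q c_q dr dc ob - 1 < init
    · have hstep : pvStep r_q c_q dr dc init ob = pvT r_q c_q dr dc ob - 1 := by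
        unfold pvStep; rw [if_pos hc]
      rw [hstep]
      rcases ih (pvT r_q c_q dr dc ob - 1) with h | ⟨ob', hm, ha1, ha2, ha3, he⟩
      · exact Or.inr ⟨ob, List.mem_cons_self, hc.1, hc.2.1, hc.2.2.1, h⟩
      · exact Or.inr ⟨ob', List.mem_cons_of_mem _ hm, ha1, ha2, ha3, he⟩
    · have hstep : pvStep r_q c_q dr dc init ob = init := by
        unfold pvStep; rw [if_neg hc]
      rw [hstep]
      rcases ih init with h | ⟨ob', hm, ha1, ha2, ha3, he⟩
      · exact Or.inl h
      · exact Or.inr ⟨ob', List.mem_cons_of_mem _ hm, ha1, ha2, ha3, he⟩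

-- membership in A's obstacle set
theorem pvObsSet_mem (obstacles : List (List Int)) (p : Int × Int) :
    PySem.Set.contains (pvObsSet obstacles) p = true ↔
      ∃ ob ∈ obstacles, pvR ob = p.1 ∧ pvC ob = p.2 := by
  unfold pvObsSet
  rw [PySem.Set.contains_iff, PySem.Set.mem_ofList]
  simp only [List.mem_map, pvR, pvC]
  constructor
  · rintro ⟨ob, hm, he⟩
    exact ⟨ob, hm, by rw [← he], by rw [← he]⟩
  · rintro ⟨ob, hm, h1, h2⟩
    exact ⟨ob, hm, by rw [h1, h2]⟩

-- the directional distance recovers the index of an obstacle i steps down the ray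
theorem pvT_on_ray (r_q c_q dr dc i : Int) (ob : List Int)
    (hdr : dr = 1 ∨ dr = 0 ∨ dr = -1) (hdc : dc = 1 ∨ dc = 0 ∨ dc = -1)
    (hne : ¬ (dr = 0 ∧ dc = 0))
    (h1 : pvR ob = r_q + i * dr) (h2 : pvC ob = c_q + i * dc) :
    pvT r_q c_q dr dc ob = i := by
  rcases hdr with h | h | h <;> rcases hdc with h' | h' | h' <;> subst h <;> subst h' <;>
    simp only [pvT, h1, h2] <;>
    first
      | (exact absurd ⟨rfl, rfl⟩ hne)
      | norm_num

-- leaving the board right past the edge limit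
theorem pvEdge_max (n r_q c_q dr dc : Int)
    (hdr : dr = 1 ∨ dr = 0 ∨ dr = -1) (hdc : dc = 1 ∨ dc = 0 ∨ dc = -1)
    (hne : ¬ (dr = 0 ∧ dc = 0)) :
    ¬ pvStepOK n r_q c_q dr dc (min (pvAxis n dr r_q) (pvAxis n dc c_q) + 1) := by
  rcases hdr with h | h | h <;> rcases hdc with h' | h' | h' <;> subst h <;> subst h' <;>
    first
      | (exact absurd ⟨rfl, rfl⟩ hne)
      | (simp only [pvStepOK, pvAxis, mul_one, mul_zero, mul_neg_one]
         norm_num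
         split_ifs <;> omega)

-- A's while loop, run from s steps down the ray, adds exactly T - s to count
theorem pvLoop (n r_q c_q dr dc : Int) (obs : PySem.Set (Int × Int)) (T : Int)
    (hT0 : 0 ≤ T)
    (Hok : ∀ i : Int, 1 ≤ i → i ≤ T → pvStepOK n r_q c_q dr dc i)
    (Hfree : ∀ i : Int, 1 ≤ i → i ≤ T →
      PySem.Set.contains obs (r_q + i * dr, c_q + i * dc) = false)
    (Hstop : PySem.Set.contains obs (r_q + (T + 1) * dr, c_q + (T + 1) * dc) = true ∨
      ¬ pvStepOK n r_q c_q dr dc (T + 1)) :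
    ∀ fuel : Nat, ∀ s count : Int, 0 ≤ s → s ≤ T → T - s < (fuel : Int) →
      pvWhileA n dr dc obs fuel (r_q + s * dr) (c_q + s * dc) count = count + (T - s) := by
  intro fuel
  induction fuel with
  | zero => intro s count h0 h1 h2; simp at h2; omega
  | succ fuel ih =>
    intro s count h0 h1 h2
    have e1 : r_q + s * dr + dr = r_q + (s + 1) * dr := by ring
    have e2 : c_q + s * dc + dc = c_q + (s + 1) * dc := by ring
    simp only [pvWhileA, e1, e2]
    by_cases hs : s = T
    · subst hs
      rcases Hstop with hmem | hnok
      · simp only [hmem, if_true, ite_self]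
        omega
      · rw [if_neg (by simpa [pvStepOK] using hnok)]
        omega
    · have hi1 : (1:Int) ≤ s + 1 := by omega
      have hi2 : s + 1 ≤ T := by omega
      have hok := Hok (s + 1) hi1 hi2
      rw [if_pos (by simpa [pvStepOK] using hok)]
      rw [Hfree (s + 1) hi1 hi2]
      simp only [Bool.false_eq_true, if_false]
      have := ih (s + 1) (count + 1) (by omega) hi2 (by push_cast at h2 ⊢; omega)
      rw [this]; omega

-- the central ray lemma: A's walk equals the per-direction closed-form fold
theorem pvRay_eq (n r_q c_q dr dc : Int) (obstacles : List (List Int))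
    (hdr : dr = 1 ∨ dr = 0 ∨ dr = -1) (hdc : dc = 1 ∨ dc = 0 ∨ dc = -1)
    (hne : ¬ (dr = 0 ∧ dc = 0)) :
    ∀ count, pvWhileA n dr dc (pvObsSet obstacles) (n.toNat + 1) r_q c_q count
      = count + pvRay n r_q c_q dr dc obstacles := by
  intro count
  have hE0 : 0 ≤ min (pvAxis n dr r_q) (pvAxis n dc c_q) :=
    le_min (pvAxis_nonneg n dr r_q) (pvAxis_nonneg n dc c_q)
  have hray : pvRay n r_q c_q dr dc obstacles
      = obstacles.foldl (pvStep r_q c_q dr dc) (min (pvAxis n dr r_q) (pvAxis n dc c_q)) := rfl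
  have hTE : 0 ≤ pvRay n r_q c_q dr dc obstacles ∧
      pvRay n r_q c_q dr dc obstacles ≤ min (pvAxis n dr r_q) (pvAxis n dc c_q) := by
    rw [hray]; exact pvFold_le r_q c_q dr dc obstacles _ hE0
  have Hok : ∀ i : Int, 1 ≤ i → i ≤ pvRay n r_q c_q dr dc obstacles →
      pvStepOK n r_q c_q dr dc i := by
    intro i h1 h2
    have hr := pvAxis_band n dr r_q hdr i h1
      (le_trans h2 (le_trans hTE.2 (min_le_left _ _)))
    have hc := pvAxis_band n dc c_q hdc i h1
      (le_trans h2 (le_trans hTE.2 (min_le_right _ _)))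
    exact ⟨hr, hc⟩
  have Hfree : ∀ i : Int, 1 ≤ i → i ≤ pvRay n r_q c_q dr dc obstacles →
      PySem.Set.contains (pvObsSet obstacles) (r_q + i * dr, c_q + i * dc) = false := by
    intro i h1 h2
    cases hx : PySem.Set.contains (pvObsSet obstacles) (r_q + i * dr, c_q + i * dc)
    · rfl
    · exfalso
      obtain ⟨ob, hm, hr, hc⟩ := (pvObsSet_mem obstacles _).1 hx
      have hti : pvT r_q c_q dr dc ob = i := pvT_on_ray r_q c_q dr dc i ob hdr hdc hne hr hc
      have hcap := pvFold_obst r_q c_q dr dc obstacles ob hm i hti.symm h1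
        (by rw [hr]; ring) (by rw [hc]; ring) _ hE0
      rw [← hray] at hcap
      omega
  have Hstop : PySem.Set.contains (pvObsSet obstacles)
        (r_q + (pvRay n r_q c_q dr dc obstacles + 1) * dr,
         c_q + (pvRay n r_q c_q dr dc obstacles + 1) * dc) = true ∨
      ¬ pvStepOK n r_q c_q dr dc (pvRay n r_q c_q dr dc obstacles + 1) := by
    rcases pvFold_cases r_q c_q dr dc obstacles (min (pvAxis n dr r_q) (pvAxis n dc c_q))
      with h | ⟨ob, hm, h1, h2, h3, he⟩
    · right
      rw [hray, h]
      exact pvEdge_max n r_q c_q dr dc hdr hdc hne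
    · have hTt : pvRay n r_q c_q dr dc obstacles + 1 = pvT r_q c_q dr dc ob := by
        rw [hray, he]; ring
      left
      apply (pvObsSet_mem obstacles _).2
      refine ⟨ob, hm, ?_, ?_⟩
      · rw [hTt]; simp only [pvR]; rw [pvR] at h2; omega
      · rw [hTt]; simp only [pvC]; rw [pvC] at h3; omega
  have hcap : pvRay n r_q c_q dr dc obstacles < (n.toNat : Int) + 1 := by
    have h1 : min (pvAxis n dr r_q) (pvAxis n dc c_q) ≤ max n 0 :=
      le_trans (min_le_left _ _) (pvAxis_le n dr r_q)
    have h2 : ((n.toNat : Int)) = max n 0 := Int.ofNat_toNat n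
    omega
  have := pvLoop n r_q c_q dr dc (pvObsSet obstacles) (pvRay n r_q c_q dr dc obstacles)
    hTE.1 Hok Hfree Hstop (n.toNat + 1) 0 count (le_refl 0) hTE.1 (by push_cast; omega)
  simpa using this

-- ===== bridge from B's dict fold to the per-direction folds =====

-- Source B's classification of one obstacle onto a ray, in the directional form
abbrev pvCnd (r_q c_q : Int) (ob : List Int) : Prop :=
  (¬ ((pvR ob - r_q = 0) ↔ (pvC ob - c_q = 0))) ∨
  (pvR ob - r_q ≠ 0 ∧ (pvR ob - r_q = pvC ob - c_q ∨ pvR ob - r_q = -(pvC ob - c_q)))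

def pvTE (r_q c_q : Int) (ob : List Int) : Int :=
  if pvR ob - r_q ≠ 0 then (if pvR ob - r_q < 0 then -(pvR ob - r_q) else pvR ob - r_q)
  else (if pvC ob - c_q < 0 then -(pvC ob - c_q) else pvC ob - c_q)

def pvDE (r_q c_q : Int) (ob : List Int) : Int × Int :=
  (pvSign (pvR ob - r_q), pvSign (pvC ob - c_q))

theorem pvStepB_eq (r_q c_q : Int) (m : PySem.Dict (Int × Int) Int) (ob : List Int) :
    pvStepB r_q c_q m ob =
      if pvCnd r_q c_q ob then
        PySem.Dict.insert m (pvDE r_q c_q ob)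
          (min (PySem.Dict.getD m (pvDE r_q c_q ob) 0) (pvTE r_q c_q ob - 1))
      else m := by
  by_cases hC : pvCnd r_q c_q ob
  · rw [if_pos hC]
    unfold pvCnd at hC
    have hg1 : ¬ (pvR ob - r_q = 0 ∧ pvC ob - c_q = 0) := by
      rcases hC with h | h
      · intro hx; exact h (by omega)
      · intro hx; exact h.1 hx.1
    have hg2 : pvR ob - r_q = 0 ∨ pvC ob - c_q = 0 ∨
        pvAbs (pvR ob - r_q) = pvAbs (pvC ob - c_q) := by
      unfold pvAbs; split_ifs <;> omega
    have hT : max (pvAbs (pvR ob - r_q)) (pvAbs (pvC ob - c_q)) = pvTE r_q c_q ob := by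
      unfold pvAbs pvTE; split_ifs <;> omega
    simp only [pvStepB]
    rw [if_neg hg1, if_pos hg2, hT]
    rfl
  · rw [if_neg hC]
    unfold pvCnd at hC
    simp only [pvStepB]
    by_cases hz : pvR ob - r_q = 0 ∧ pvC ob - c_q = 0
    · rw [if_pos hz]
    · rw [if_neg hz]
      have hg2 : ¬ (pvR ob - r_q = 0 ∨ pvC ob - c_q = 0 ∨
          pvAbs (pvR ob - r_q) = pvAbs (pvC ob - c_q)) := by
        unfold pvAbs; split_ifs <;> omega
      rw [if_neg hg2]

theorem pvAlign_iff (r_q c_q : Int) (ob : List Int) (d0 : Int × Int)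
    (hd0 : d0 ∈ pvDirs) :
    ((1 ≤ pvT r_q c_q d0.1 d0.2 ob ∧
      pvR ob - r_q = pvT r_q c_q d0.1 d0.2 ob * d0.1 ∧
      pvC ob - c_q = pvT r_q c_q d0.1 d0.2 ob * d0.2)
     ↔ (pvCnd r_q c_q ob ∧ d0 = pvDE r_q c_q ob))
    ∧ (d0 = pvDE r_q c_q ob → pvT r_q c_q d0.1 d0.2 ob = pvTE r_q c_q ob) := by
  simp only [pvDirs, List.mem_cons, List.not_mem_nil, or_false] at hd0
  rcases hd0 with h | h | h | h | h | h | h | h <;> subst h <;>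
    simp only [pvT, pvCnd, pvDE, pvTE, pvSign, Prod.mk.injEq] <;>
    norm_num <;> split_ifs <;> omega

theorem pvDE_mem (r_q c_q : Int) (ob : List Int) (h : pvCnd r_q c_q ob) :
    pvDE r_q c_q ob ∈ pvDirs := by
  unfold pvCnd at h
  unfold pvDE pvSign pvDirs
  simp only [List.mem_cons, List.not_mem_nil, or_false, Prod.mk.injEq]
  split_ifs <;> omega

theorem pvStepB_getD (r_q c_q : Int) (m : PySem.Dict (Int × Int) Int) (ob : List Int)
    (d0 : Int × Int) (hd0 : d0 ∈ pvDirs) :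
    PySem.Dict.getD (pvStepB r_q c_q m ob) d0 0
      = pvStep r_q c_q d0.1 d0.2 (PySem.Dict.getD m d0 0) ob := by
  have hiff := (pvAlign_iff r_q c_q ob d0 hd0).1
  have hte := (pvAlign_iff r_q c_q ob d0 hd0).2
  rw [pvStepB_eq]
  unfold pvStep
  by_cases hd : d0 = pvDE r_q c_q ob
  · rw [← hd]
    by_cases hC : pvCnd r_q c_q ob
    · have hTeq : pvT r_q c_q d0.1 d0.2 ob = pvTE r_q c_q ob := hte hd
      obtain ⟨a1, a2, a3⟩ := hiff.mpr ⟨hC, hd⟩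
      rw [if_pos hC, PySem.Dict.getD_insert, if_pos rfl]
      split_ifs with h4
      · omega
      · have : ¬ (pvT r_q c_q d0.1 d0.2 ob - 1 < PySem.Dict.getD m d0 0) := by
          intro hx; exact h4 ⟨a1, a2, a3, hx⟩
        omega
    · rw [if_neg hC,
        if_neg (fun hcc => hC (hiff.mp ⟨hcc.1, hcc.2.1, hcc.2.2.1⟩).1)]
  · have hrhs : ¬ (1 ≤ pvT r_q c_q d0.1 d0.2 ob ∧
        pvR ob - r_q = pvT r_q c_q d0.1 d0.2 ob * d0.1 ∧
        pvC ob - c_q = pvT r_q c_q d0.1 d0.2 ob * d0.2 ∧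
        pvT r_q c_q d0.1 d0.2 ob - 1 < PySem.Dict.getD m d0 0) :=
      fun hcc => hd (hiff.mp ⟨hcc.1, hcc.2.1, hcc.2.2.1⟩).2
    by_cases hC : pvCnd r_q c_q ob
    · rw [if_pos hC, PySem.Dict.getD_insert, if_neg hd, if_neg hrhs]
    · rw [if_neg hC, if_neg hrhs]

theorem pvStepB_keys (r_q c_q : Int) (m : PySem.Dict (Int × Int) Int) (ob : List Int)
    (h : PySem.Dict.keys m = pvDirs) :
    PySem.Dict.keys (pvStepB r_q c_q m ob) = pvDirs := by
  rw [pvStepB_eq]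
  split_ifs with hc
  · rw [PySem.Dict.keys_insert_of_contains]
    · exact h
    · rw [PySem.Dict.contains_iff_mem_keys, h]
      exact pvDE_mem r_q c_q ob hc
  · exact h

theorem pvFoldB_getD (r_q c_q : Int) (l : List (List Int)) (d0 : Int × Int)
    (hd0 : d0 ∈ pvDirs) :
    ∀ m : PySem.Dict (Int × Int) Int,
      PySem.Dict.getD (l.foldl (pvStepB r_q c_q) m) d0 0
        = l.foldl (pvStep r_q c_q d0.1 d0.2) (PySem.Dict.getD m d0 0) := by
  induction l with
  | nil => intro m; rfl
  | cons ob l ih =>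
    intro m
    simp only [List.foldl_cons]
    rw [ih, pvStepB_getD r_q c_q m ob d0 hd0]

theorem pvFoldB_keys (r_q c_q : Int) (l : List (List Int)) :
    ∀ m : PySem.Dict (Int × Int) Int, PySem.Dict.keys m = pvDirs →
      PySem.Dict.keys (l.foldl (pvStepB r_q c_q) m) = pvDirs := by
  induction l with
  | nil => intro m h; exact h
  | cons ob l ih =>
    intro m h
    simp only [List.foldl_cons]
    exact ih _ (pvStepB_keys r_q c_q m ob h)

-- a dict with distinct keys lists its values as the lookups of its keys
theorem pvValues_eq_map_keys (m : PySem.Dict (Int × Int) Int)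
    (h : (PySem.Dict.keys m).Nodup) :
    PySem.Dict.values m = (PySem.Dict.keys m).map (fun d => PySem.Dict.getD m d 0) := by
  obtain ⟨l⟩ := m
  induction l with
  | nil => rfl
  | cons p r ih =>
    obtain ⟨k, v⟩ := p
    simp only [PySem.Dict.keys_mk, PySem.Dict.values_mk, List.map_cons] at *
    have hnd := List.nodup_cons.1 h
    refine List.cons_eq_cons.mpr ⟨?_, ?_⟩
    · rw [PySem.Dict.getD_eq_get?_getD, PySem.Dict.get?_mk_cons]
      simp
    · have hcg : ∀ d ∈ r.map Prod.fst,
          PySem.Dict.getD (PySem.Dict.mk ((k, v) :: r)) d 0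
            = PySem.Dict.getD (PySem.Dict.mk r) d 0 := by
        intro d hd
        have hk : (k == d) = false := by
          have hne : k ≠ d := fun he => hnd.1 (he ▸ hd)
          simp [hne]
        rw [PySem.Dict.getD_eq_get?_getD, PySem.Dict.get?_mk_cons, hk]
        simp [← PySem.Dict.getD_eq_get?_getD]
      rw [List.map_congr_left hcg]
      exact ih hnd.2

-- the initial dict of the 8 reaches
theorem pvLim0_getD (n r_q c_q : Int) (d0 : Int × Int) (hd0 : d0 ∈ pvDirs) :
    PySem.Dict.getD (pvDirsB.foldl
      (fun m d => PySem.Dict.insert m d (pvReach n r_q c_q d.1 d.2))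
      PySem.Dict.empty) d0 0 = pvReach n r_q c_q d0.1 d0.2 := by
  simp only [pvDirs, List.mem_cons, List.not_mem_nil, or_false] at hd0
  rcases hd0 with h | h | h | h | h | h | h | h <;> subst h <;>
    simp [pvDirsB, List.foldl, PySem.Dict.getD_insert, Prod.mk.injEq]

-- ===== VERDICT (by name: the statement is the Claim_ definition above) =====
theorem queensAttack_spec : Claim_equal_queensAttack := by
  intro n k r_q c_q obstacles _ _
  unfold Spec_queensAttack queensAttack queensAttack_alt
  simp only [List.foldl]
  rw [pvRay_eq n r_q c_q 1 0 obstacles (by tauto) (by tauto) (by simp)]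
  rw [pvRay_eq n r_q c_q 0 1 obstacles (by tauto) (by tauto) (by simp)]
  rw [pvRay_eq n r_q c_q (-1) 0 obstacles (by tauto) (by tauto) (by simp)]
  rw [pvRay_eq n r_q c_q 0 (-1) obstacles (by tauto) (by tauto) (by simp)]
  rw [pvRay_eq n r_q c_q 1 1 obstacles (by tauto) (by tauto) (by simp)]
  rw [pvRay_eq n r_q c_q (-1) (-1) obstacles (by tauto) (by tauto) (by simp)]
  rw [pvRay_eq n r_q c_q (-1) 1 obstacles (by tauto) (by tauto) (by simp)]
  rw [pvRay_eq n r_q c_q 1 (-1) obstacles (by tauto) (by tauto) (by simp)]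
  have hkeys : PySem.Dict.keys (obstacles.foldl (pvStepB r_q c_q)
      (pvDirsB.foldl
        (fun m d => PySem.Dict.insert m d (pvReach n r_q c_q d.1 d.2))
        PySem.Dict.empty)) = pvDirs :=
    pvFoldB_keys r_q c_q obstacles _ rfl
  rw [pvValues_eq_map_keys _ (by rw [hkeys]; decide), hkeys]
  simp only [pvDirs, List.map_cons, List.map_nil, List.sum_cons, List.sum_nil]
  rw [pvFoldB_getD r_q c_q obstacles (1,0) (by decide),
    pvFoldB_getD r_q c_q obstacles (0,1) (by decide),
    pvFoldB_getD r_q c_q obstacles (-1,0) (by decide),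
    pvFoldB_getD r_q c_q obstacles (0,-1) (by decide),
    pvFoldB_getD r_q c_q obstacles (1,1) (by decide),
    pvFoldB_getD r_q c_q obstacles (-1,-1) (by decide),
    pvFoldB_getD r_q c_q obstacles (-1,1) (by decide),
    pvFoldB_getD r_q c_q obstacles (1,-1) (by decide)]
  rw [pvLim0_getD n r_q c_q (1,0) (by decide),
    pvLim0_getD n r_q c_q (0,1) (by decide),
    pvLim0_getD n r_q c_q (-1,0) (by decide),
    pvLim0_getD n r_q c_q (0,-1) (by decide),
    pvLim0_getD n r_q c_q (1,1) (by decide),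
    pvLim0_getD n r_q c_q (-1,-1) (by decide),
    pvLim0_getD n r_q c_q (-1,1) (by decide),
    pvLim0_getD n r_q c_q (1,-1) (by decide)]
  have e1 : min (pvAxis n 1 r_q) (pvAxis n 0 c_q) = pvReach n r_q c_q 1 0 := by
    simp only [pvAxis, pvReach, pvEdge]; norm_num; first | (split_ifs <;> omega) | omega
  have e2 : min (pvAxis n 0 r_q) (pvAxis n 1 c_q) = pvReach n r_q c_q 0 1 := by
    simp only [pvAxis, pvReach, pvEdge]; norm_num; first | (split_ifs <;> omega) | omega
  have e3 : min (pvAxis n (-1) r_q) (pvAxis n 0 c_q) = pvReach n r_q c_q (-1) 0 := by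
    simp only [pvAxis, pvReach, pvEdge]; norm_num; first | (split_ifs <;> omega) | omega
  have e4 : min (pvAxis n 0 r_q) (pvAxis n (-1) c_q) = pvReach n r_q c_q 0 (-1) := by
    simp only [pvAxis, pvReach, pvEdge]; norm_num; first | (split_ifs <;> omega) | omega
  have e5 : min (pvAxis n 1 r_q) (pvAxis n 1 c_q) = pvReach n r_q c_q 1 1 := by
    simp only [pvAxis, pvReach, pvEdge]; norm_num; first | (split_ifs <;> omega) | omega
  have e6 : min (pvAxis n (-1) r_q) (pvAxis n (-1) c_q) = pvReach n r_q c_q (-1) (-1) := by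
    simp only [pvAxis, pvReach, pvEdge]; norm_num; first | (split_ifs <;> omega) | omega
  have e7 : min (pvAxis n (-1) r_q) (pvAxis n 1 c_q) = pvReach n r_q c_q (-1) 1 := by
    simp only [pvAxis, pvReach, pvEdge]; norm_num; first | (split_ifs <;> omega) | omega
  have e8 : min (pvAxis n 1 r_q) (pvAxis n (-1) c_q) = pvReach n r_q c_q 1 (-1) := by
    simp only [pvAxis, pvReach, pvEdge]; norm_num; first | (split_ifs <;> omega) | omega
  simp only [pvRay, e1, e2, e3, e4, e5, e6, e7, e8]
  ring
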